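-- pv_equiv track=rewrite | github.com/sobhanshukueian/TSP-GA | TSP.py | OnePointCrossover
-- ===== SOURCE A (Python) =====
-- def OnePointCrossover(roulette_wheel):
--     """One point crossover
--
--     Args:
--         roulette_wheel (array): roulette wheel array
--
--     Returns:
--         array: one point crossover
--     """
--     crossover = []
--     i = 0
--     while i < len(roulette_wheel) - 1:
--         child1 = []
--         child2 = []
--         child1 += roulette_wheel[i][:5]
--         child1 += roulette_wheel[i+1][5:]
--         child2 += roulette_wheel[i+1][:5]
--         child2 += roulette_wheel[i][5:]
--         x = [item for item in roulette_wheel[0] if item not in child1]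
--         child1 += x
--         child1 = list(dict.fromkeys(child1))
--         x = [item for item in roulette_wheel[0] if item not in child2]
--         child2 += x
--         child2 = list(dict.fromkeys(child2))
--         crossover.append(child1)
--         crossover.append(child2)
--         i += 2
--     return crossover
-- ===== SOURCE B (Python) =====
-- def OnePointCrossover(roulette_wheel):
--     """One point crossover: consume the population pairwise and build each
--     child with a single ordered-dedup pass over head + tail + reference."""
--     ref = roulette_wheel[0] if roulette_wheel else []
--     out = []
--     rest = roulette_wheel
--     while len(rest) >= 2:
--         a, b = rest[0], rest[1]
--         rest = rest[2:]
--         out.append(list(dict.fromkeys(a[:5] + b[5:] + ref)))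
--         out.append(list(dict.fromkeys(b[:5] + a[5:] + ref)))
--     return out
-- ===== Notes on version B (the rewrite author's own statement) =====
-- stated objective: simpler
-- what changed: Replaces the index-stepping while loop and the two-phase child build (quadratic membership-filter list comprehension followed by dict.fromkeys dedup) with structural pairwise consumption of the list and a single ordered-dedup pass over head+tail+reference.
import Mathlib
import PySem

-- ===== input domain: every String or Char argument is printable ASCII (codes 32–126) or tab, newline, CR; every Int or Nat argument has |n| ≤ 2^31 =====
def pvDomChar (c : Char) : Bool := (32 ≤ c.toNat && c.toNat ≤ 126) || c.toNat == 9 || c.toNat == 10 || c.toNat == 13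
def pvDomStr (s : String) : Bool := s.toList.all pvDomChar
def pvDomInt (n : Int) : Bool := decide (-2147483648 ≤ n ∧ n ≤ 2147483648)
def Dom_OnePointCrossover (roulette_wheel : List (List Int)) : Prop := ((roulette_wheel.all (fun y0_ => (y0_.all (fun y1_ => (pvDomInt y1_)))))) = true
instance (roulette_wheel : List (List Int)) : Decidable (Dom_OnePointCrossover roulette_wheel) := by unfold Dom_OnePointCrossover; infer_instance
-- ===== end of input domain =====

-- B consumes the population pairwise and builds each child in one ordered-dedup pass
-- (no index arithmetic, no separate quadratic membership-filter phase); same return value.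

-- ===== PORT A =====
-- while i < len(rw) - 1: build child1/child2 (head+tail, filter ref, dedup), append, i += 2
def opcLoopA (rw : List (List Int)) (i : Nat) (crossover : List (List Int)) : List (List Int) :=
  if h : i + 1 < rw.length then
    let ci := rw[i]'(by omega)
    let cj := rw[i+1]'h
    let rw0 := rw.headD []   -- rw[0]; in range since the loop guard gives rw.length ≥ 2
    let c1 := PySem.List.slice ci none (some 5) ++ PySem.List.slice cj (some 5) none
    let c2 := PySem.List.slice cj none (some 5) ++ PySem.List.slice ci (some 5) none
    let x1 := rw0.filter (fun item => decide (item ∉ c1))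
    let child1 := PySem.List.dedup (c1 ++ x1)
    let x2 := rw0.filter (fun item => decide (item ∉ c2))
    let child2 := PySem.List.dedup (c2 ++ x2)
    opcLoopA rw (i+2) (crossover ++ [child1, child2])
  else crossover
termination_by rw.length - i

def OnePointCrossover (roulette_wheel : List (List Int)) : List (List Int) :=
  opcLoopA roulette_wheel 0 []

-- ===== PORT B =====
-- structural pairwise consumption; each child is one dedup of head ++ tail ++ ref
def opcPairs (ref : List Int) : List (List Int) → List (List Int)
  | a :: b :: rest =>
      PySem.List.dedup (PySem.List.slice a none (some 5) ++ PySem.List.slice b (some 5) none ++ ref)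
        :: PySem.List.dedup (PySem.List.slice b none (some 5) ++ PySem.List.slice a (some 5) none ++ ref)
        :: opcPairs ref rest
  | _ => []

def OnePointCrossover_alt (roulette_wheel : List (List Int)) : List (List Int) :=
  opcPairs (roulette_wheel.headD []) roulette_wheel

-- ===== PRECONDITION & SPEC =====
def Spec_OnePointCrossover (roulette_wheel : List (List Int)) (out : List (List Int)) : Prop := out = OnePointCrossover_alt roulette_wheel
instance (roulette_wheel : List (List Int)) (out : List (List Int)) : Decidable (Spec_OnePointCrossover roulette_wheel out) := by unfold Spec_OnePointCrossover; infer_instance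

-- ===== CLAIM (what is proved, stated in full; the proofs are below) =====
def Claim_equal_OnePointCrossover : Prop := ∀ (roulette_wheel : List (List Int)), Dom_OnePointCrossover roulette_wheel → Spec_OnePointCrossover roulette_wheel (OnePointCrossover roulette_wheel)

-- ===== LEMMAS AND PROOFS =====

-- filtering out elements already in s before folding Set.add over a set containing c changes nothing
theorem foldl_add_filter (c : List Int) : ∀ (r s : List Int), (∀ x ∈ c, x ∈ s) →
    (r.filter (fun x => decide (x ∉ c))).foldl PySem.Set.add s = r.foldl PySem.Set.add s := by
  intro r
  induction r with
  | nil => intro s _; rfl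
  | cons x r ih =>
    intro s hs
    by_cases hx : x ∈ c
    · have hadd : PySem.Set.add s x = s := by
        simp [PySem.Set.add, PySem.Set.contains, hs x hx]
      have hp : decide (x ∉ c) = false := by simp [hx]
      rw [List.filter_cons, hp]
      simp only [Bool.false_eq_true, if_false, List.foldl_cons, hadd]
      exact ih s hs
    · have hp : decide (x ∉ c) = true := by simp [hx]
      rw [List.filter_cons, hp, if_pos rfl, List.foldl_cons, List.foldl_cons]
      exact ih (PySem.Set.add s x) (fun y hy => by
        simp only [PySem.Set.mem_add]; exact Or.inl (hs y hy))

-- A's filter-then-dedup equals B's single dedup of the concatenation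
theorem dedup_filter_eq (c r : List Int) :
    PySem.List.dedup (c ++ r.filter (fun x => decide (x ∉ c))) = PySem.List.dedup (c ++ r) := by
  simp only [PySem.List.dedup_eq_ofList, PySem.Set.ofList_eq_foldl, List.foldl_append]
  exact foldl_add_filter c r (c.foldl PySem.Set.add []) (fun x hx => by
    have : x ∈ PySem.Set.ofList c := by simp [PySem.Set.mem_ofList, hx]
    simpa [PySem.Set.ofList_eq_foldl] using this)

theorem opcLoopA_eq (rw : List (List Int)) (i : Nat) (acc : List (List Int)) :
    opcLoopA rw i acc = acc ++ opcPairs (rw.headD []) (rw.drop i) := by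
  induction i, acc using opcLoopA.induct (rw := rw) with
  | case1 i acc h ci cj rw0 c1 c2 x1 child1 x2 child2 ih =>
    have hdrop : rw.drop i = ci :: cj :: rw.drop (i+2) := by
      rw [List.drop_eq_getElem_cons (by omega : i < rw.length)]
      congr 1
      rw [List.drop_eq_getElem_cons (by omega : i + 1 < rw.length)]
    have h1 : child1 = PySem.List.dedup (c1 ++ rw0) := by
      simpa [child1, x1] using dedup_filter_eq c1 rw0
    have h2 : child2 = PySem.List.dedup (c2 ++ rw0) := by
      simpa [child2, x2] using dedup_filter_eq c2 rw0
    have key : opcLoopA rw i acc = opcLoopA rw (i+2) (acc ++ [child1, child2]) := by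
      rw [opcLoopA, dif_pos h]
    rw [key, ih, hdrop]
    simp only [opcPairs]
    rw [h1, h2]
    simp [c1, c2, rw0, List.append_assoc]
  | case2 i acc h =>
    have hlen : (rw.drop i).length ≤ 1 := by simp; omega
    have hnil : opcPairs (rw.headD []) (rw.drop i) = [] := by
      cases hd : rw.drop i with
      | nil => rfl
      | cons a t =>
        cases t with
        | nil => rfl
        | cons b t' => rw [hd] at hlen; simp at hlen
    rw [opcLoopA, dif_neg h, hnil, List.append_nil]

-- ===== VERDICT (by name: the statement is the Claim_ definition above) =====
theorem OnePointCrossover_spec : Claim_equal_OnePointCrossover := by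
  intro rw _
  show OnePointCrossover rw = OnePointCrossover_alt rw
  rw [OnePointCrossover, OnePointCrossover_alt, opcLoopA_eq]
  simp
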